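-- pv_equiv track=rewrite | github.com/wegjgwioj/MedChat | app/agent/graph.py | _build_guard_warning_lines
-- ===== SOURCE A (Python) =====
-- from typing import Any, Dict, List, Literal, Optional, Tuple, cast
--
-- def _build_guard_warning_lines(guard_result: Dict[str, Any]) -> List[str]:
--     warnings: List[str] = []
--     seen = set()
--
--     for conflict in guard_result.get("conflicts", []) or []:
--         source_fact_value = str(conflict.get("source_fact_value") or "").strip()
--         if source_fact_value:
--             line = f"你已确认{source_fact_value}，本轮已去除冲突用药建议。"
--         else:
--             line = "你已确认存在用药禁忌，本轮已去除冲突用药建议。"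
--         if line not in seen:
--             seen.add(line)
--             warnings.append(line)
--
--     return warnings
-- ===== SOURCE B (Python) =====
-- def _build_guard_warning_lines(guard_result):
--     def line(conflict):
--         v = str(conflict.get("source_fact_value") or "").strip()
--         if v:
--             return f"你已确认{v}，本轮已去除冲突用药建议。"
--         return "你已确认存在用药禁忌，本轮已去除冲突用药建议。"
--
--     def dedup(lines):
--         # keep-first dedup by recursion: head, then recurse on the tail
--         # with every copy of the head filtered out
--         if not lines:
--             return []
--         head = lines[0]
--         return [head] + dedup([l for l in lines[1:] if l != head])
--
--     return dedup([line(c) for c in (guard_result.get("conflicts", []) or [])])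
-- ===== Notes on version B (the rewrite author's own statement) =====
-- stated objective: alternative
-- what changed: Replaces A's single fused loop with an inline seen-set by a map pass followed by a recursive head-and-filter deduplication (take the head, filter all its duplicates out of the tail, recurse) that uses no auxiliary set or dict at all.
import Mathlib
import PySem

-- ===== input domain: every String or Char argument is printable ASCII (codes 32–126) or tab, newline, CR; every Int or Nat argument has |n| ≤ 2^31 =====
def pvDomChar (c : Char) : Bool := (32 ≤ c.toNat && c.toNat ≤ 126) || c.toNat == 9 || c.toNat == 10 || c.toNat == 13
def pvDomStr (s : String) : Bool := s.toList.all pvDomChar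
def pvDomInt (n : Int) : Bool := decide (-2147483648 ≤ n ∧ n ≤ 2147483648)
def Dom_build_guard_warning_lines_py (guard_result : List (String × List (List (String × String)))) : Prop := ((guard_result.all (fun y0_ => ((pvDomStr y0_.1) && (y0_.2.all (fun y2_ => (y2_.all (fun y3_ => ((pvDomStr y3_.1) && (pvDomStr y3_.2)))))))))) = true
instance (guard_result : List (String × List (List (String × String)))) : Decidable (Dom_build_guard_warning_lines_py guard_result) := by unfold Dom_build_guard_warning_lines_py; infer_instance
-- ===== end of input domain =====

-- B change (honest one-liner): B maps conflicts to warning lines, then deduplicates by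
-- recursive head-and-filter (head, then recurse on the tail with the head's duplicates
-- filtered out), using no auxiliary set; objective: alternative (same result, no set state).

-- ===== PORT A =====
-- Literal transliteration of A: one loop over conflicts carrying (warnings, seen);
-- `conflict.get("source_fact_value") or ""` is the match below (None is not representable
-- in the typed input, so only the ""-falsy branch arises).
def build_guard_warning_lines_py (guard_result : List (String × List (List (String × String)))) : List String :=
  let conflicts0 := (PySem.Dict.mk guard_result).getD "conflicts" []
  let conflicts := if conflicts0 = [] then [] else conflicts0  -- `… or []`
  let final := conflicts.foldl
    (fun (st : List String × PySem.Set String) conflict =>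
      let v := match (PySem.Dict.mk conflict).get? "source_fact_value" with
               | some s => if s = "" then "" else s
               | none => ""
      let source_fact_value := PySem.Str.strip v
      let line := if source_fact_value ≠ "" then
          "你已确认" ++ source_fact_value ++ "，本轮已去除冲突用药建议。"
        else "你已确认存在用药禁忌，本轮已去除冲突用药建议。"
      if ¬ PySem.Set.contains st.2 line then (st.1 ++ [line], PySem.Set.add st.2 line)
      else st)
    ([], PySem.Set.empty)
  final.1

-- ===== PORT B =====
-- Source B's helper `line`
def pvWarningLine (conflict : List (String × String)) : String :=
  let v := PySem.Str.strip
    (match (PySem.Dict.mk conflict).get? "source_fact_value" with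
     | some s => if s = "" then "" else s
     | none => "")
  if v ≠ "" then
    "你已确认" ++ v ++ "，本轮已去除冲突用药建议。"
  else "你已确认存在用药禁忌，本轮已去除冲突用药建议。"

-- Source B's recursive `dedup`: head, then recurse on the tail with the head filtered out
def pvDedup : List String → List String
  | [] => []
  | h :: t => h :: pvDedup (t.filter (fun l => l ≠ h))
termination_by l => l.length
decreasing_by
  simp only [List.length_cons, List.length_unattach]
  exact Nat.lt_succ_of_le (le_trans (List.length_filter_le _ _) (by simp))

def build_guard_warning_lines_py_alt (guard_result : List (String × List (List (String × String)))) : List String :=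
  let conflicts0 := (PySem.Dict.mk guard_result).getD "conflicts" []
  let conflicts := if conflicts0 = [] then [] else conflicts0
  pvDedup (conflicts.map pvWarningLine)

-- ===== PRECONDITION & SPEC =====
def Spec_build_guard_warning_lines_py (guard_result : List (String × List (List (String × String)))) (out : List String) : Prop := out = build_guard_warning_lines_py_alt guard_result
instance (guard_result : List (String × List (List (String × String)))) (out : List String) : Decidable (Spec_build_guard_warning_lines_py guard_result out) := by unfold Spec_build_guard_warning_lines_py; infer_instance

-- ===== CLAIM =====
def Claim_equal_build_guard_warning_lines_py : Prop := ∀ (guard_result : List (String × List (List (String × String)))), Dom_build_guard_warning_lines_py guard_result → Spec_build_guard_warning_lines_py guard_result (build_guard_warning_lines_py guard_result)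

-- ===== LEMMAS AND PROOFS =====

-- One step of A's dedup loop, started on the diagonal, is Set.add on both components.
theorem pv_step_diag (s : PySem.Set String) (l : String) :
    (if ¬ PySem.Set.contains s l then (s ++ [l], PySem.Set.add s l) else (s, s))
      = (PySem.Set.add s l, PySem.Set.add s l) := by
  by_cases h : l ∈ s <;> simp [PySem.Set.add, PySem.Set.contains, h]

-- A's fused loop, on the diagonal, computes foldl Set.add of the mapped lines.
theorem pv_fold_diag (f : List (String × String) → String)
    (cs : List (List (String × String))) (s : PySem.Set String) :
    (cs.foldl
      (fun (st : List String × PySem.Set String) c =>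
        if ¬ PySem.Set.contains st.2 (f c) then (st.1 ++ [f c], PySem.Set.add st.2 (f c))
        else st)
      (s, s)).1 = cs.foldl (fun t c => PySem.Set.add t (f c)) s := by
  induction cs generalizing s with
  | nil => rfl
  | cons c cs ih =>
    simp only [List.foldl_cons]
    rw [pv_step_diag s (f c)]
    exact ih (PySem.Set.add s (f c))

-- foldl Set.add = acc ++ head-and-filter dedup of the not-yet-seen elements.
theorem pv_foldl_add_eq_dedup (l : List String) (acc : List String) :
    l.foldl (fun t c => PySem.Set.add t c) acc
      = acc ++ pvDedup (l.filter (fun x => ¬ x ∈ acc)) := by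
  induction l generalizing acc with
  | nil => simp [pvDedup.eq_def]
  | cons h t ih =>
    simp only [List.foldl_cons]
    by_cases hm : h ∈ acc
    · rw [show PySem.Set.add acc h = acc by simp [PySem.Set.add, hm]]
      rw [ih acc]
      simp [hm]
    · rw [show PySem.Set.add acc h = acc ++ [h] by simp [PySem.Set.add, hm]]
      rw [ih (acc ++ [h])]
      have hfilter : t.filter (fun x => ¬ x ∈ acc ++ [h])
          = (t.filter (fun x => ¬ x ∈ acc)).filter (fun x => x ≠ h) := by
        rw [List.filter_filter]
        apply List.filter_congr
        intro x _
        by_cases hx : x = h <;> by_cases hxa : x ∈ acc <;> simp [hx, hxa]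
      rw [hfilter]
      have : (h :: t).filter (fun x => ¬ x ∈ acc)
          = h :: t.filter (fun x => ¬ x ∈ acc) := by simp [hm]
      rw [this]
      rw [pvDedup]
      simp

-- The two ports agree once the per-conflict line function is abstracted.
theorem pv_combined (f : List (String × String) → String)
    (cs : List (List (String × String))) :
    (cs.foldl
      (fun (st : List String × PySem.Set String) c =>
        if ¬ PySem.Set.contains st.2 (f c) then (st.1 ++ [f c], PySem.Set.add st.2 (f c))
        else st)
      ([], PySem.Set.empty)).1 = pvDedup (cs.map f) := by
  rw [show (PySem.Set.empty : PySem.Set String) = ([] : List String) from rfl]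
  rw [pv_fold_diag f cs []]
  rw [← List.foldl_map]
  rw [pv_foldl_add_eq_dedup]
  simp

-- ===== VERDICT =====
theorem build_guard_warning_lines_py_spec : Claim_equal_build_guard_warning_lines_py := by
  intro guard_result _
  unfold Spec_build_guard_warning_lines_py build_guard_warning_lines_py build_guard_warning_lines_py_alt
  exact pv_combined pvWarningLine _
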